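-- pv_equiv track=rewrite | github.com/Clara-Ye/15-112 | hw3.py | bonusEncode3
-- ===== SOURCE A (Python) =====
-- def bonusEncode3(msg):
--     result = ""
--     prev = 0
--     for i in range(len(msg)):
--         curr = ord(msg[i])
--         if (result != ""): result += ","
--         if ((i+1) % 15 == 0): result += "\n"
--         result += str(curr - prev)
--         prev = curr
--     return result
-- ===== SOURCE B (Python) =====
-- def bonusEncode3(msg):
--     ords = [ord(c) for c in msg]
--     deltas = [str(a - b) for a, b in zip(ords, [0] + ords)]
--     rows = [",".join(deltas[k:k+15]) for k in range(14, len(deltas), 15)]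
--     return ",\n".join([",".join(deltas[:14])] + rows)
-- ===== Notes on version B (the rewrite author's own statement) =====
-- stated objective: alternative
-- what changed: Eliminates A's per-character modulus-15 newline test and growing string accumulator: B builds the delta strings in one shot by zipping the ord list with its shifted self, slices them into rows (one of 14 numbers, then chunks of 15 at offsets range(14, n, 15)) and joins the rows with a comma-newline separator.
import Mathlib
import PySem

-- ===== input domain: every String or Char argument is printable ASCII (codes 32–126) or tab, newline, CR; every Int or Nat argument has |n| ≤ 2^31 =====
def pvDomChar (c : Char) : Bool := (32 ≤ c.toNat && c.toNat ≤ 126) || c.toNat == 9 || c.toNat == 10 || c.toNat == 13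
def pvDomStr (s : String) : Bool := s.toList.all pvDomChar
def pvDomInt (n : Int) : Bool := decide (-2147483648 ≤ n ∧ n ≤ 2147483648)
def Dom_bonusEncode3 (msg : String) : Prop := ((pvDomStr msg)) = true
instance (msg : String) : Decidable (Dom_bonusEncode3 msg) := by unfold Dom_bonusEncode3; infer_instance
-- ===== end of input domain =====

-- B drops A's per-character modulus-15 test and string accumulator: it builds the delta
-- strings by zipping the ord list with its shifted self, slices them into rows (14 numbers,
-- then chunks of 15) and joins the rows with a comma-newline separator (alternative).

-- ===== PORT A =====
-- literal transliteration of A: result/prev state threaded through the indexed loop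
def bonusEncode3 (msg : String) : String :=
  let s := msg.toList
  let fin := (PySem.List.pyRange 0 (PySem.Str.len msg) 1).foldl
    (fun (acc : List Char × Int) i =>
      let result := acc.1
      let prev := acc.2
      let curr : Int := ((PySem.List.pyGetD s i ' ').toNat : Int)
      let result := if result ≠ [] then result ++ [','] else result
      let result := if PySem.Int.mod (i + 1) 15 = 0 then result ++ ['\n'] else result
      let result := result ++ PySem.Int.toChars (curr - prev)
      (result, curr))
    ([], 0)
  String.mk fin.1

-- ===== PORT B =====
-- literal transliteration of Source B: ords, zip deltas, rows sliced at offsets range(14, n, 15), joined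
def bonusEncode3_alt (msg : String) : String :=
  let ords : List Int := msg.toList.map (fun c => (c.toNat : Int))
  let deltas : List (List Char) := (ords.zip (0 :: ords)).map (fun q => PySem.Int.toChars (q.1 - q.2))
  let rows : List (List Char) := (PySem.List.pyRange 14 (PySem.List.len deltas) 15).map
    (fun k => PySem.Chars.join [','] (PySem.List.slice deltas (some k) (some (k + 15))))
  String.mk (PySem.Chars.join [',', '\n']
    (PySem.Chars.join [','] (PySem.List.slice deltas none (some 14)) :: rows))

-- ===== PRECONDITION & SPEC =====
def Spec_bonusEncode3 (msg : String) (out : String) : Prop := out = bonusEncode3_alt msg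
instance (msg : String) (out : String) : Decidable (Spec_bonusEncode3 msg out) := by unfold Spec_bonusEncode3; infer_instance

-- ===== CLAIM (what is proved, stated in full; the proofs are below) =====
def Claim_equal_bonusEncode3 : Prop := ∀ (msg : String), Dom_bonusEncode3 msg → Spec_bonusEncode3 msg (bonusEncode3 msg)

-- ===== LEMMAS AND PROOFS =====

-- A's loop body, with the (index, char) pair taken from enumerate
def pvStepA (acc : List Char × Int) (q : Int × Char) : List Char × Int :=
  let result := acc.1
  let prev := acc.2
  let curr : Int := ((q.2).toNat : Int)
  let result := if result ≠ [] then result ++ [','] else result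
  let result := if PySem.Int.mod (q.1 + 1) 15 = 0 then result ++ ['\n'] else result
  let result := result ++ PySem.Int.toChars (curr - prev)
  (result, curr)

-- the encoded pieces of a suffix cs, starting at index i with previous ord p
def pvParts : List Char → Int → Int → List (List Char)
  | [], _, _ => []
  | c :: t, i, p =>
      ((if PySem.Int.mod (i + 1) 15 = 0 then ['\n'] else []) ++ PySem.Int.toChars ((c.toNat : Int) - p))
        :: pvParts t (i + 1) (c.toNat : Int)

-- the delta strings of a suffix cs with previous ord p
def pvDeltaStrs : List Char → Int → List (List Char)
  | [], _ => []
  | c :: t, p => PySem.Int.toChars ((c.toNat : Int) - p) :: pvDeltaStrs t (c.toNat : Int)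

-- mark with '\n' every element whose countdown hits 0; countdown resets to 14
def pvMarkN : List (List Char) → Nat → List (List Char)
  | [], _ => []
  | d :: t, 0 => (['\n'] ++ d) :: pvMarkN t 14
  | d :: t, k + 1 => d :: pvMarkN t k

-- marking for a suffix that begins exactly at a newline position
def pvMarkNL : List (List Char) → List (List Char)
  | [] => []
  | d :: t => (['\n'] ++ d) :: pvMarkN t 14

lemma pvToChars_ne_nil (n : Int) : PySem.Int.toChars n ≠ [] := by
  unfold PySem.Int.toChars
  split
  · simp
  · exact List.ne_nil_of_length_pos Nat.length_toDigits_pos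

lemma pvJoin_comma (p : List Char) (ps : List (List Char)) :
    PySem.Chars.join [','] (p :: ps) = p ++ ps.flatMap (fun pt => ',' :: pt) := by
  induction ps generalizing p with
  | nil => simp [PySem.Chars.join_singleton]
  | cons q rest ih => simp [PySem.Chars.join_cons_cons, ih]

lemma pvAfold (cs : List Char) (i p : Int) (r : List Char) (h : r ≠ []) :
    ((PySem.List.enumerate cs i).foldl pvStepA (r, p)).1
      = r ++ (pvParts cs i p).flatMap (fun pt => ',' :: pt) := by
  induction cs generalizing i p r with
  | nil => simp [PySem.List.enumerate, pvParts]
  | cons c t ih =>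
      rw [PySem.List.enumerate_cons]
      have hstep : pvStepA (r, p) (i, c)
          = (r ++ [','] ++ (if PySem.Int.mod (i + 1) 15 = 0 then ['\n'] else [])
              ++ PySem.Int.toChars ((c.toNat : Int) - p), (c.toNat : Int)) := by
        simp only [pvStepA, h, if_pos, ne_eq, not_false_iff]
        split <;> simp
      rw [List.foldl_cons, hstep, ih _ _ _ (by simp)]
      simp [pvParts]

lemma pvAmain (cs : List Char) (i p : Int) :
    ((PySem.List.enumerate cs i).foldl pvStepA (([] : List Char), p)).1
      = PySem.Chars.join [','] (pvParts cs i p) := by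
  cases cs with
  | nil => simp [PySem.List.enumerate, pvParts, PySem.Chars.join_nil]
  | cons c t =>
      rw [PySem.List.enumerate_cons]
      have hpart : pvStepA (([] : List Char), p) (i, c)
          = ((if PySem.Int.mod (i + 1) 15 = 0 then ['\n'] else [])
              ++ PySem.Int.toChars ((c.toNat : Int) - p), (c.toNat : Int)) := by
        simp only [pvStepA]
        split <;> simp
      have hne : ((if PySem.Int.mod (i + 1) 15 = 0 then ['\n'] else [])
          ++ PySem.Int.toChars ((c.toNat : Int) - p)) ≠ [] := by
        intro hcontra
        exact pvToChars_ne_nil _ (List.append_eq_nil_iff.mp hcontra).2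
      rw [List.foldl_cons, hpart, pvAfold t (i + 1) _ _ hne]
      rw [pvParts, pvJoin_comma]

-- B's zip-built delta strings are pvDeltaStrs
lemma pvZipDeltas (cs : List Char) (p : Int) :
    (((cs.map (fun c => ((c.toNat : Int)))).zip (p :: cs.map (fun c => ((c.toNat : Int))))).map
        (fun q => PySem.Int.toChars (q.1 - q.2)))
      = pvDeltaStrs cs p := by
  induction cs generalizing p with
  | nil => simp [pvDeltaStrs]
  | cons c t ih => simp [pvDeltaStrs, ih (c.toNat : Int)]

-- A's pieces are the delta strings marked with a countdown: the next newline sits k ahead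
lemma pvParts_eq_markN (cs : List Char) (i : Int) (k : Nat) (p : Int)
    (hi : 0 ≤ i) (hk : k ≤ 14) (hm : PySem.Int.mod (i + 1 + k) 15 = 0) :
    pvParts cs i p = pvMarkN (pvDeltaStrs cs p) k := by
  induction cs generalizing i k p with
  | nil => simp [pvParts, pvDeltaStrs, pvMarkN]
  | cons c t ih =>
      rw [PySem.Int.mod_eq_emod_of_pos (by omega)] at hm
      cases k with
      | zero =>
          have hc : PySem.Int.mod (i + 1) 15 = 0 := by
            rw [PySem.Int.mod_eq_emod_of_pos (by omega)]; omega
          have hrec : PySem.Int.mod ((i + 1) + 1 + (14 : Nat)) 15 = 0 := by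
            rw [PySem.Int.mod_eq_emod_of_pos (by omega)]
            push_cast; omega
          simp only [pvParts, pvDeltaStrs, pvMarkN, hc, if_pos]
          rw [ih (i + 1) 14 _ (by omega) (by omega) hrec]
      | succ k' =>
          have hc : ¬ PySem.Int.mod (i + 1) 15 = 0 := by
            rw [PySem.Int.mod_eq_emod_of_pos (by omega)]
            push_cast at hm; omega
          have hrec : PySem.Int.mod ((i + 1) + 1 + (k' : Nat)) 15 = 0 := by
            rw [PySem.Int.mod_eq_emod_of_pos (by omega)]
            push_cast at hm ⊢; omega
          simp only [pvParts, pvDeltaStrs, pvMarkN, hc, if_neg, not_false_iff, List.nil_append]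
          rw [ih (i + 1) k' _ (by omega) (by omega) hrec]

lemma pvMarkN_plain (ds : List (List Char)) (k : Nat) (h : ds.length ≤ k) :
    pvMarkN ds k = ds := by
  induction ds generalizing k with
  | nil => cases k <;> rfl
  | cons d t ih =>
      cases k with
      | zero => simp at h
      | succ k' => simp only [pvMarkN]; rw [ih k' (by simpa using h)]

lemma pvMarkN_peel (k : Nat) (ds : List (List Char)) (h : k < ds.length) :
    pvMarkN ds k = ds.take k ++ pvMarkNL (ds.drop k) := by
  induction k generalizing ds with
  | zero =>
      cases ds with
      | nil => simp at h
      | cons d t => simp [pvMarkN, pvMarkNL]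
  | succ k' ih =>
      cases ds with
      | nil => simp at h
      | cons d t =>
          simp only [pvMarkN, List.take_succ_cons, List.drop_succ_cons, List.cons_append]
          rw [ih t (by simpa using h)]

lemma pvJoin_pre (sep p d : List Char) (t : List (List Char)) :
    PySem.Chars.join sep ((p ++ d) :: t) = p ++ PySem.Chars.join sep (d :: t) := by
  cases t with
  | nil => simp [PySem.Chars.join_singleton]
  | cons y t' => simp [PySem.Chars.join_cons_cons]

lemma pvJoin_append (sep : List Char) (xs ys : List (List Char)) (hx : xs ≠ []) (hy : ys ≠ []) :
    PySem.Chars.join sep (xs ++ ys)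
      = PySem.Chars.join sep xs ++ sep ++ PySem.Chars.join sep ys := by
  induction xs with
  | nil => exact absurd rfl hx
  | cons x xs' ih =>
      cases xs' with
      | nil =>
          cases ys with
          | nil => exact absurd rfl hy
          | cons y t => simp [PySem.Chars.join_cons_cons, PySem.Chars.join_singleton]
      | cons x2 t2 =>
          have hih := ih (by simp)
          rw [List.cons_append] at hih
          rw [List.cons_append, List.cons_append,
            PySem.Chars.join_cons_cons sep x x2 (t2 ++ ys), hih,
            PySem.Chars.join_cons_cons sep x x2 t2]
          simp [List.append_assoc]

lemma pvJoin_cons_ne (sep x : List Char) (rest : List (List Char)) (h : rest ≠ []) :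
    PySem.Chars.join sep (x :: rest) = x ++ sep ++ PySem.Chars.join sep rest := by
  cases rest with
  | nil => exact absurd rfl h
  | cons y t => rw [PySem.Chars.join_cons_cons]

lemma pvMarkNL_ne_nil (ds : List (List Char)) (h : ds ≠ []) : pvMarkNL ds ≠ [] := by
  cases ds with
  | nil => exact absurd rfl h
  | cons d t => simp [pvMarkNL]

lemma pvRange15_cons (a b : Int) (h : a < b) :
    PySem.List.pyRange a b 15 = a :: PySem.List.pyRange (a + 15) b 15 := by
  simp only [PySem.List.pyRange]
  norm_num
  rw [if_pos h]
  by_cases h2 : a + 15 < b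
  · rw [if_pos h2]
    have hc : (b - a + 15 - 1) / 15 = (b - (a + 15) + 15 - 1) / 15 + 1 := by omega
    have hn : ((b - a + 15 - 1) / 15).toNat = ((b - (a + 15) + 15 - 1) / 15).toNat + 1 := by omega
    rw [hn, List.range_succ_eq_map, List.map_cons, List.map_map]
    congr 1
    · norm_num
    · apply List.map_congr_left
      intro k _
      simp only [Function.comp_apply]
      push_cast
      ring
  · rw [if_neg h2]
    have hn : ((b - a + 15 - 1) / 15).toNat = 1 := by omega
    rw [hn]
    norm_num

lemma pvRange15_nil (a b : Int) (h : ¬ a < b) : PySem.List.pyRange a b 15 = [] := by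
  simp only [PySem.List.pyRange]
  norm_num
  omega

-- a suffix starting at a newline position joins to '\n' ++ the ",\n"-join of its 15-rows
lemma pvTail (D : List (List Char)) (j : Nat) (h : j < D.length) :
    PySem.Chars.join [','] (pvMarkNL (D.drop j))
      = ['\n'] ++ PySem.Chars.join [',', '\n']
          ((PySem.List.pyRange (j : Int) (PySem.List.len D) 15).map
            (fun k => PySem.Chars.join [','] (PySem.List.slice D (some k) (some (k + 15))))) := by
  have hlen : PySem.List.len D = (D.length : Int) := rfl
  obtain ⟨d, t, hdt⟩ : ∃ d t, D.drop j = d :: t := by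
    cases hD : D.drop j with
    | nil => exact absurd (List.drop_eq_nil_iff.mp hD) (by omega)
    | cons d t => exact ⟨d, t, rfl⟩
  have htlen : t.length = D.length - j - 1 := by
    have := congrArg List.length hdt
    simp only [List.length_drop, List.length_cons] at this
    omega
  have hslice : PySem.List.slice D (some (j : Int)) (some ((j : Int) + 15))
      = (D.drop j).take 15 := by
    rw [PySem.List.slice_toNat D (by omega) (by omega)]
    have h1 : ((j : Int)).toNat = j := by omega
    have h2 : ((j : Int) + 15).toNat = j + 15 := by omega
    rw [h1, h2]
    congr 1
    omega
  rw [hlen, pvRange15_cons _ _ (by exact_mod_cast h), List.map_cons, hslice, hdt]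
  by_cases h2 : (j : Int) + 15 < (D.length : Int)
  · have ht14 : 14 < t.length := by omega
    have hdrop2 : t.drop 14 = D.drop (j + 15) := by
      have : (D.drop j).drop 15 = D.drop (j + 15) := by
        rw [List.drop_drop]
      rw [hdt] at this
      simpa using this
    have hne : D.drop (j + 15) ≠ [] := by
      intro hc
      have := List.drop_eq_nil_iff.mp hc
      omega
    have hcast : (((j + 15 : Nat)) : Int) = (j : Int) + 15 := by push_cast; ring
    have hrec := pvTail D (j + 15) (by omega)
    rw [hlen, hcast] at hrec
    simp only [pvMarkNL]
    rw [pvMarkN_peel 14 t ht14, pvJoin_pre,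
      show (d :: (t.take 14 ++ pvMarkNL (t.drop 14))) = (d :: t.take 14) ++ pvMarkNL (t.drop 14)
        by simp,
      pvJoin_append [','] (d :: t.take 14) _ (by simp)
        (pvMarkNL_ne_nil _ (by rw [hdrop2]; exact hne)),
      hdrop2, hrec,
      show (d :: t).take 15 = d :: t.take 14 by simp,
      pvJoin_cons_ne [',', '\n'] _ _ (by
        rw [pvRange15_cons _ _ h2]
        simp)]
    simp [List.append_assoc]
  · have ht14 : t.length ≤ 14 := by omega
    rw [pvRange15_nil _ _ h2]
    simp only [pvMarkNL, List.map_nil]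
    rw [pvMarkN_plain t 14 ht14, pvJoin_pre, PySem.Chars.join_singleton,
      show (d :: t).take 15 = d :: t.take 14 by simp,
      List.take_of_length_le (by omega : t.length ≤ 14)]
termination_by D.length - j
decreasing_by omega

-- the full marked join equals B's first-row-of-14-then-sliced-rows assembly
lemma pvMain (ds : List (List Char)) :
    PySem.Chars.join [','] (pvMarkN ds 14)
      = PySem.Chars.join [',', '\n']
          (PySem.Chars.join [','] (PySem.List.slice ds none (some 14)) ::
            (PySem.List.pyRange 14 (PySem.List.len ds) 15).map
              (fun k => PySem.Chars.join [','] (PySem.List.slice ds (some k) (some (k + 15))))) := by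
  have hlen : PySem.List.len ds = (ds.length : Int) := rfl
  rw [PySem.List.slice_to ds (by omega : (0:Int) ≤ (14:Int)),
    show ((14:Int)).toNat = 14 from rfl]
  by_cases h : 14 < ds.length
  · have hdrop : ds.drop 14 ≠ [] := by
      intro hc
      have := List.drop_eq_nil_iff.mp hc
      omega
    have htake : ds.take 14 ≠ [] := by
      intro hc
      rcases List.take_eq_nil_iff.mp hc with h' | h'
      · omega
      · subst h'; simp at h
    have htail := pvTail ds 14 h
    have hcast : (((14 : Nat)) : Int) = (14 : Int) := by norm_num
    rw [hcast] at htail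
    rw [pvMarkN_peel 14 ds h,
      pvJoin_append [','] (ds.take 14) _ htake (pvMarkNL_ne_nil _ hdrop),
      htail,
      pvJoin_cons_ne [',', '\n'] _ _ (by
        rw [pvRange15_cons 14 _ (by rw [hlen]; exact_mod_cast h)]
        simp)]
    simp [List.append_assoc]
  · rw [pvMarkN_plain ds 14 (by omega),
      pvRange15_nil 14 _ (by rw [hlen]; exact_mod_cast h),
      List.map_nil, PySem.Chars.join_singleton,
      List.take_of_length_le (by omega : ds.length ≤ 14)]

-- ===== VERDICT (by name: the statement is the Claim_ definition above) =====
theorem bonusEncode3_spec : Claim_equal_bonusEncode3 := by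
  intro msg _
  show bonusEncode3 msg = bonusEncode3_alt msg
  simp only [bonusEncode3, bonusEncode3_alt]
  have hlen : PySem.Str.len msg = PySem.List.len msg.toList := by
    simp [PySem.Str.len, PySem.List.len]
  have henum : (PySem.List.pyRange 0 (PySem.List.len msg.toList) 1).foldl
      (fun (acc : List Char × Int) i =>
        let result := acc.1
        let prev := acc.2
        let curr : Int := ((PySem.List.pyGetD msg.toList i ' ').toNat : Int)
        let result := if result ≠ [] then result ++ [','] else result
        let result := if PySem.Int.mod (i + 1) 15 = 0 then result ++ ['\n'] else result
        let result := result ++ PySem.Int.toChars (curr - prev)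
        (result, curr))
      (([] : List Char), 0)
      = (PySem.List.enumerate msg.toList 0).foldl pvStepA (([] : List Char), 0) := by
    rw [PySem.List.enumerate_eq_map_pyRange msg.toList ' ', List.foldl_map]
    rfl
  rw [hlen, henum, pvAmain msg.toList 0 0,
    pvParts_eq_markN msg.toList 0 14 0 (by omega) (by omega) (by decide),
    pvZipDeltas msg.toList 0, pvMain]
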